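-- pv_equiv track=rewrite | github.com/grgrbll/fix | generate.py | processRegex
-- ===== SOURCE A (Python) =====
-- def processRegex(r, substitutions):
--     ret = r
--     subStart = ret.find('{{')
--     subEnd = (ret.find('}}', subStart + 2) if subStart != -1 else -1)
--     while subStart != -1:
--         subTag = ret[subStart+2:subEnd]
--         subVal = substitutions.get(subTag,"")
--         ret = ret[:subStart] + subVal + (ret[subEnd+2:] if len(ret) > subEnd+2 else "")
--         subStart = ret.find('{{')
--         subEnd = (ret.find('}}', subStart + 2) if subStart != -1 else -1)
--     return ret
-- ===== SOURCE B (Python) =====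
-- def processRegex(r, substitutions):
--     # single left-to-right pass: commit the tag-free prefix, then rescan only the
--     # substituted value plus the remaining tail (values may re-introduce tags)
--     out = ""
--     rest = r
--     while True:
--         i = rest.find('{{')
--         if i == -1:
--             out += rest
--             break
--         j = rest.find('}}', i + 2)
--         if j == -1:
--             out += rest
--             break
--         out += rest[:i]
--         rest = substitutions.get(rest[i + 2:j], "") + rest[j + 2:]
--     return out
-- ===== Notes on version B (the rewrite author's own statement) =====
-- stated objective: alternative
-- what changed: A rebuilds the whole string and rescans it from index 0 after every substitution; B makes one left-to-right pass that commits the tag-free prefix to an output buffer and continues scanning only the substituted value plus the remaining tail, so committed text is never copied or rescanned.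
-- outside the precondition, e.g. on processRegex('ab{{cd', {}): A does not finish within the time limit, B returns 'ab{{cd'; on processRegex('{{{ba}', {}): A returns '{ba}', B returns '{{{ba}'; on processRegex('{{b}}{', {'b': '{'}): A returns '{', B returns '{{'
import Mathlib
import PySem

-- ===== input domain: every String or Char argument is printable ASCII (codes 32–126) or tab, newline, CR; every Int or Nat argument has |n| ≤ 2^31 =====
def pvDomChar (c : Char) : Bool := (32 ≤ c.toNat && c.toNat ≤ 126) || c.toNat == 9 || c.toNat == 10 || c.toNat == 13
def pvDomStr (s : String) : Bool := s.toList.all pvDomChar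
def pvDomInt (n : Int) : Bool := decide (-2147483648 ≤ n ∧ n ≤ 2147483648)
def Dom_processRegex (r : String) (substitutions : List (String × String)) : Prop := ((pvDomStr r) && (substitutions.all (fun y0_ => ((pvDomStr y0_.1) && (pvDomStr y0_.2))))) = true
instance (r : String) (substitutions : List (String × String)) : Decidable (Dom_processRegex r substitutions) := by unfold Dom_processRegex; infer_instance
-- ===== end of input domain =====

-- B replaces A's repeated rebuild-and-rescan-from-the-start loop by a single left-to-right
-- pass that commits the tag-free prefix to an output buffer and continues scanning only the
-- substituted value plus the remaining tail (objective: alternative).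

-- ===== PORT A =====
-- fuel makes A's while-loop total; on every input admitted by Pre_ the loop runs at most
-- pvCnt(r) ≤ |r| times, so the fuel r.length + 1 is never exhausted there.
def processRegexLoop (substitutions : List (String × String)) : Nat → List Char → Int → Int → List Char
  | 0, ret, _, _ => ret
  | fuel+1, ret, subStart, subEnd =>
    if subStart ≠ -1 then
      let subTag := PySem.Chars.slice ret (some (subStart + 2)) (some subEnd)
      let subVal := PySem.Dict.getD (PySem.Dict.mk substitutions) (String.ofList subTag) ""
      let ret' := PySem.Chars.slice ret none (some subStart) ++ subVal.toList ++
          (if PySem.Chars.len ret > subEnd + 2 then PySem.Chars.slice ret (some (subEnd + 2)) none else [])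
      let subStart' := PySem.Chars.find ret' ['{','{']
      let subEnd' := if subStart' ≠ -1 then PySem.Chars.findFrom ret' ['}','}'] (subStart' + 2) none else -1
      processRegexLoop substitutions fuel ret' subStart' subEnd'
    else ret

def processRegex (r : String) (substitutions : List (String × String)) : String :=
  let ret := r.toList
  let subStart := PySem.Chars.find ret ['{','{']
  let subEnd := if subStart ≠ -1 then PySem.Chars.findFrom ret ['}','}'] (subStart + 2) none else -1
  String.ofList (processRegexLoop substitutions (ret.length + 1) ret subStart subEnd)

-- ===== PORT B =====
def processRegexAltLoop (substitutions : List (String × String)) : Nat → List Char → List Char → List Char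
  | 0, out, rest => out ++ rest
  | fuel+1, out, rest =>
    let i := PySem.Chars.find rest ['{','{']
    if i = -1 then out ++ rest
    else
      let j := PySem.Chars.findFrom rest ['}','}'] (i + 2) none
      if j = -1 then out ++ rest
      else
        processRegexAltLoop substitutions fuel
          (out ++ PySem.Chars.slice rest none (some i))
          ((PySem.Dict.getD (PySem.Dict.mk substitutions)
              (String.ofList (PySem.Chars.slice rest (some (i + 2)) (some j))) "").toList
            ++ PySem.Chars.slice rest (some (j + 2)) none)

def processRegex_alt (r : String) (substitutions : List (String × String)) : String :=
  String.ofList (processRegexAltLoop substitutions (r.toList.length + 1) [] r.toList)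

-- ===== PRECONDITION & SPEC =====
-- Pre_ excludes inputs on which A returns an accidental value or diverges, but only when r
-- contains a '{{' at all: an unmatched '{{' (A then takes everything up to the LAST character
-- as the tag and splices ret[1:] after it, usually looping forever), and substitution values
-- containing '{' (A rescans already-substituted text, so tags spanning a replacement boundary
-- are an artefact of its rebuild-from-scratch strategy).
def Pre_processRegex (r : String) (substitutions : List (String × String)) : Prop :=
  (¬ ['{','{'] <:+: r.toList) ∨
  ((∀ k < r.toList.length, ['{','{'] <+: r.toList.drop k → ['}','}'] <:+: r.toList.drop (k + 2)) ∧
   (∀ p ∈ substitutions, '{' ∉ p.2.toList))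

instance (r : String) (substitutions : List (String × String)) : Decidable (Pre_processRegex r substitutions) := by
  unfold Pre_processRegex; infer_instance

def pvWitness_processRegex : String × (List (String × String)) :=
  ("hello {{name}}, bye", [("name", "world")])

def Spec_processRegex (r : String) (substitutions : List (String × String)) (out : String) : Prop := out = processRegex_alt r substitutions
instance (r : String) (substitutions : List (String × String)) (out : String) : Decidable (Spec_processRegex r substitutions out) := by unfold Spec_processRegex; infer_instance

-- ===== CLAIM (what is proved, stated in full; the proofs are below) =====
def Claim_equal_processRegex : Prop := ∀ (r : String) (substitutions : List (String × String)), Dom_processRegex r substitutions → Pre_processRegex r substitutions → Spec_processRegex r substitutions (processRegex r substitutions)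

-- ===== LEMMAS AND PROOFS =====

-- an occurrence of "{{" at position m
def pvOcc (s : List Char) (m : Nat) : Prop := s[m]? = some '{' ∧ s[m + 1]? = some '{'
-- no "{{" anywhere
def pvNoBB (s : List Char) : Prop := ∀ m, ¬ pvOcc s m
-- every "{{" is followed (two positions later or more) by a "}}"
def pvGood (s : List Char) : Prop := ∀ m, pvOcc s m → ['}','}'] <:+: s.drop (m + 2)
-- number of occurrences of "{{"
def pvCnt : List Char → Nat
  | [] => 0
  | [_] => 0
  | a :: b :: t => (if a = '{' ∧ b = '{' then 1 else 0) + pvCnt (b :: t)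

lemma pv_prefix2_iff (a b : Char) (s : List Char) (m : Nat) :
    [a, b] <+: s.drop m ↔ s[m]? = some a ∧ s[m + 1]? = some b := by
  constructor
  · rintro ⟨t, ht⟩
    have h0 : (s.drop m)[0]? = some a := by rw [← ht]; rfl
    have h1 : (s.drop m)[1]? = some b := by rw [← ht]; rfl
    rw [List.getElem?_drop] at h0 h1
    simpa using And.intro h0 h1
  · rintro ⟨h1, h2⟩
    have hm1 : m + 1 < s.length := List.getElem?_eq_some_iff.mp h2 |>.1
    have hm : m < s.length := by omega
    have e1 : s[m] = a := by have := List.getElem?_eq_getElem hm; rw [h1] at this; exact (Option.some.inj this).symm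
    have e2 : s[m+1] = b := by have := List.getElem?_eq_getElem hm1; rw [h2] at this; exact (Option.some.inj this).symm
    rw [List.drop_eq_getElem_cons hm, List.drop_eq_getElem_cons hm1, e1, e2]
    exact ⟨s.drop (m+2), rfl⟩


lemma pv_infix2_iff (a b : Char) (s : List Char) :
    [a, b] <:+: s ↔ ∃ m, s[m]? = some a ∧ s[m + 1]? = some b := by
  rw [← PySem.Chars.isIn_iff_infix, ← PySem.Chars.exists_prefix_drop_iff_isIn]
  exact exists_congr fun m => pv_prefix2_iff a b s m


lemma pv_find_eq_of_first (s sub : List Char) (n : Nat) (h1 : sub <+: s.drop n)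
    (h2 : ∀ m < n, ¬ sub <+: s.drop m) : PySem.Chars.find s sub = (n : Int) := by
  have hinf : sub <:+: s := by
    rw [← PySem.Chars.isIn_iff_infix, ← PySem.Chars.exists_prefix_drop_iff_isIn]
    exact ⟨n, h1⟩
  have hnn : 0 ≤ PySem.Chars.find s sub := (PySem.Chars.find_nonneg_iff s sub).mpr hinf
  obtain ⟨hp, hmin⟩ := PySem.Chars.find_spec hnn
  have : (PySem.Chars.find s sub).toNat = n := by
    rcases lt_trichotomy (PySem.Chars.find s sub).toNat n with h | h | h
    · exact absurd hp (h2 _ h)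
    · exact h
    · exact absurd h1 (hmin n h)
  omega


lemma pv_find_occ (s : List Char) (i : Nat) (h : PySem.Chars.find s ['{','{'] = (i : Int)) :
    pvOcc s i ∧ ∀ m < i, ¬ pvOcc s m := by
  have hnn : 0 ≤ PySem.Chars.find s ['{','{'] := by rw [h]; positivity
  obtain ⟨hp, hmin⟩ := PySem.Chars.find_spec hnn
  have ht : (PySem.Chars.find s ['{','{']).toNat = i := by omega
  rw [ht] at hp hmin
  exact ⟨(pv_prefix2_iff _ _ _ _).mp hp, fun m hm hocc => hmin m hm ((pv_prefix2_iff _ _ _ _).mpr hocc)⟩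


lemma pvOcc_append (out rest : List Char) (hBB : pvNoBB out) (hL : out.getLast? ≠ some '{') (m : Nat) :
    pvOcc (out ++ rest) m ↔ out.length ≤ m ∧ pvOcc rest (m - out.length) := by
  constructor
  · rintro ⟨h1, h2⟩
    rw [List.getElem?_append] at h1 h2
    by_cases hm : m + 1 < out.length
    · exact absurd ⟨by simpa [show m < out.length by omega] using h1,
        by simpa [hm] using h2⟩ (hBB m)
    · by_cases hm2 : m < out.length
      · -- m = out.length - 1 : last char of out is '{'
        have hlast : out.getLast? = some '{' := by
          rw [List.getLast?_eq_getElem?]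
          have : out.length - 1 = m := by omega
          rw [this]; simpa [hm2] using h1
        exact absurd hlast hL
      · refine ⟨by omega, by simpa [hm2] using h1, ?_⟩
        have : m + 1 - out.length = m - out.length + 1 := by omega
        rw [← this]; simpa [hm] using h2
  · rintro ⟨hle, h1, h2⟩
    constructor
    · rw [List.getElem?_append, if_neg (by omega)]; exact h1
    · rw [List.getElem?_append, if_neg (by omega)]
      have : m + 1 - out.length = m - out.length + 1 := by omega
      rw [this]; exact h2


lemma pv_find_append (out rest : List Char) (hBB : pvNoBB out) (hL : out.getLast? ≠ some '{') :
    PySem.Chars.find (out ++ rest) ['{','{'] =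
      if PySem.Chars.find rest ['{','{'] = -1 then -1
      else (out.length : Int) + PySem.Chars.find rest ['{','{'] := by
  have hiff : ∀ m, ([ '{','{'] <+: (out ++ rest).drop m) ↔ (out.length ≤ m ∧ pvOcc rest (m - out.length)) := by
    intro m
    rw [show ([ '{','{'] <+: (out ++ rest).drop m) ↔ pvOcc (out ++ rest) m from by
      rw [pv_prefix2_iff]; rfl]
    exact pvOcc_append out rest hBB hL m
  by_cases hF : PySem.Chars.find rest ['{','{'] = -1
  · rw [if_pos hF]
    rw [PySem.Chars.find_eq_neg_one_iff] at hF ⊢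
    intro hinf
    apply hF
    obtain ⟨m, hm⟩ := (pv_infix2_iff '{' '{' (out ++ rest)).mp hinf
    have := (hiff m).mp (by rw [pv_prefix2_iff]; exact hm)
    rw [pv_infix2_iff]
    exact ⟨m - out.length, this.2⟩
  · rw [if_neg hF]
    have hnn : 0 ≤ PySem.Chars.find rest ['{','{'] := by
      have := PySem.Chars.neg_one_le_find rest ['{','{']
      omega
    set i := (PySem.Chars.find rest ['{','{']).toNat with hi
    have hfi : PySem.Chars.find rest ['{','{'] = (i : Int) := by omega
    obtain ⟨hocc, hmin⟩ := pv_find_occ rest i hfi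
    have : PySem.Chars.find (out ++ rest) ['{','{'] = ((out.length + i : Nat) : Int) := by
      apply pv_find_eq_of_first
      · rw [pv_prefix2_iff]
        exact (pvOcc_append out rest hBB hL _).mpr ⟨by omega, by simpa using hocc⟩
      · intro m hm hpre
        have h2 := (hiff m).mp hpre
        exact hmin _ (by omega) h2.2
    rw [this, hfi]; push_cast; ring


lemma pvCnt_cons (c : Char) (t : List Char) :
    pvCnt (c :: t) = (if c = '{' ∧ t[0]? = some '{' then 1 else 0) + pvCnt t := by
  cases t with
  | nil => simp [pvCnt]
  | cons b t' => simp [pvCnt]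


lemma pvCnt_le_cons (c : Char) (t : List Char) : pvCnt t ≤ pvCnt (c :: t) := by
  rw [pvCnt_cons]; omega


lemma pvCnt_drop_le (s : List Char) (k : Nat) : pvCnt (s.drop k) ≤ pvCnt s := by
  induction s generalizing k with
  | nil => simp
  | cons c t ih =>
    cases k with
    | zero => simp
    | succ k' => calc pvCnt ((c :: t).drop (k' + 1)) = pvCnt (t.drop k') := rfl
        _ ≤ pvCnt t := ih k'
        _ ≤ pvCnt (c :: t) := pvCnt_le_cons c t


lemma pvCnt_drop_occ (s : List Char) (i : Nat) (h : pvOcc s i) :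
    pvCnt (s.drop i) = pvCnt (s.drop (i + 1)) + 1 := by
  obtain ⟨h1, h2⟩ := h
  have hi1 : i + 1 < s.length := List.getElem?_eq_some_iff.mp h2 |>.1
  have hi : i < s.length := by omega
  have e1 : s[i] = '{' := by have := List.getElem?_eq_getElem hi; rw [h1] at this; exact (Option.some.inj this).symm
  have e2 : s[i+1] = '{' := by have := List.getElem?_eq_getElem hi1; rw [h2] at this; exact (Option.some.inj this).symm
  rw [List.drop_eq_getElem_cons hi, List.drop_eq_getElem_cons hi1, e1, e2]
  simp [pvCnt]; omega


lemma pvCnt_prepend_free (v u : List Char) (hv : '{' ∉ v) : pvCnt (v ++ u) = pvCnt u := by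
  induction v with
  | nil => simp
  | cons c v' ih =>
    have hc : c ≠ '{' := fun h => hv (by simp [h])
    rw [List.cons_append, pvCnt_cons, if_neg (by tauto), ih (fun h => hv (by simp [h]))]; simp


lemma pvCnt_le_length (s : List Char) : pvCnt s ≤ s.length := by
  induction s with
  | nil => simp [pvCnt]
  | cons c t ih => rw [pvCnt_cons]; simp only [List.length_cons]; split_ifs <;> omega


lemma pv_getD_cases (subs : List (String × String)) (k : String) :
    PySem.Dict.getD (PySem.Dict.mk subs) k "" = "" ∨
      ∃ p ∈ subs, PySem.Dict.getD (PySem.Dict.mk subs) k "" = p.2 := by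
  induction subs with
  | nil => left; rfl
  | cons q rest ih =>
    rw [show PySem.Dict.getD (PySem.Dict.mk (q :: rest)) k "" =
        ((PySem.Dict.mk (q :: rest)).get? k).getD "" from rfl]
    rw [show (PySem.Dict.mk (q :: rest)) = PySem.Dict.mk ((q.1, q.2) :: rest) by simp]
    rw [PySem.Dict.get?_mk_cons]
    by_cases hq : (q.1 == k) = true
    · rw [if_pos hq]; right; exact ⟨q, by simp, rfl⟩
    · rw [if_neg hq]
      rcases ih with h | ⟨p, hp, he⟩
      · left; exact h
      · right; exact ⟨p, by simp [hp], he⟩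


lemma pv_noBB_out' (out rest : List Char) (i : Nat) (hBB : pvNoBB out)
    (hL : out.getLast? ≠ some '{') (hmin : ∀ m < i, ¬ pvOcc rest m) :
    pvNoBB (out ++ rest.take i) := by
  intro m hm
  obtain ⟨hle, h1, h2⟩ := (pvOcc_append out (rest.take i) hBB hL m).mp hm
  set k := m - out.length
  rw [List.getElem?_take] at h1 h2
  by_cases hk1 : k + 1 < i
  · exact hmin k (by omega) ⟨by simpa [show k < i by omega] using h1, by simpa [hk1] using h2⟩
  · simp [hk1] at h2


lemma pv_last_out' (out rest : List Char) (i : Nat) (hL : out.getLast? ≠ some '{')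
    (hocc : pvOcc rest i) (hmin : ∀ m < i, ¬ pvOcc rest m) :
    (out ++ rest.take i).getLast? ≠ some '{' := by
  rcases Nat.eq_zero_or_pos i with hi | hi
  · simpa [hi] using hL
  · have hilen : i < rest.length := by
      have := List.getElem?_eq_some_iff.mp hocc.1 |>.1; omega
    have hlen : (rest.take i).length = i := by simp; omega
    rw [List.getLast?_eq_getElem?, List.getElem?_append, List.length_append, hlen,
      if_neg (by omega)]
    intro hcon
    have hidx : out.length + i - 1 - out.length = i - 1 := by omega
    rw [hidx, List.getElem?_take, if_pos (by omega)] at hcon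
    apply hmin (i - 1) (by omega)
    constructor
    · rw [show i - 1 = i - 1 from rfl]; exact hcon
    · rw [show i - 1 + 1 = i by omega]; exact hocc.1


lemma pv_good_rest' (rest v : List Char) (d : Nat) (hgood : pvGood rest) (hv : '{' ∉ v) :
    pvGood (v ++ rest.drop d) := by
  intro m hm
  obtain ⟨h1, h2⟩ := hm
  rw [List.getElem?_append] at h1 h2
  have hm1 : ¬ m < v.length := by
    intro h; exact hv (List.mem_of_getElem? (by rw [← h1, if_pos h]))
  have hm2 : ¬ m + 1 < v.length := by omega
  rw [if_neg hm1] at h1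
  rw [if_neg hm2] at h2
  set k := m - v.length with hk
  have h2' : (rest.drop d)[k + 1]? = some '{' := by
    rw [show k + 1 = m + 1 - v.length by omega]; exact h2
  have hoccr : pvOcc rest (d + k) := by
    constructor
    · rw [← List.getElem?_drop]; exact h1
    · rw [show d + k + 1 = d + (k + 1) by omega, ← List.getElem?_drop]; exact h2'
  have := hgood (d + k) hoccr
  rw [show (v ++ rest.drop d).drop (m + 2) = (rest.drop d).drop (k + 2) by
    rw [List.drop_append, List.drop_eq_nil_of_le (by omega : v.length ≤ m + 2),
      show m + 2 - v.length = k + 2 by omega]; simp]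
  rw [List.drop_drop, show d + (k + 2) = d + k + 2 by omega]
  exact this


lemma pv_loop_eq (subs : List (String × String)) (hv : ∀ p ∈ subs, '{' ∉ p.2.toList) :
    ∀ (fuel : Nat) (out rest : List Char), pvGood rest → pvNoBB out →
      out.getLast? ≠ some '{' → pvCnt rest < fuel →
      processRegexLoop subs fuel (out ++ rest)
          (PySem.Chars.find (out ++ rest) ['{','{'])
          (if PySem.Chars.find (out ++ rest) ['{','{'] ≠ -1 then
             PySem.Chars.findFrom (out ++ rest) ['}','}'] (PySem.Chars.find (out ++ rest) ['{','{'] + 2) none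
           else -1)
        = processRegexAltLoop subs fuel out rest := by
  intro fuel
  induction fuel with
  | zero => intro out rest _ _ _ hcnt; omega
  | succ fuel ih =>
    intro out rest hgood hBB hL hcnt
    by_cases hF : PySem.Chars.find rest ['{','{'] = -1
    · have hSA : PySem.Chars.find (out ++ rest) ['{','{'] = -1 := by
        rw [pv_find_append out rest hBB hL, if_pos hF]
      simp only [processRegexLoop, processRegexAltLoop, hSA, hF]
      simp
    · have hnn : 0 ≤ PySem.Chars.find rest ['{','{'] := by
        have := PySem.Chars.neg_one_le_find rest ['{','{']; omega
      set i := (PySem.Chars.find rest ['{','{']).toNat with hidef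
      have hfi : PySem.Chars.find rest ['{','{'] = (i : Int) := by omega
      obtain ⟨hocc, hmin⟩ := pv_find_occ rest i hfi
      have hi2 : i + 2 ≤ rest.length := by
        have := List.getElem?_eq_some_iff.mp hocc.2 |>.1; omega
      have hgc : ['}','}'] <:+: rest.drop (i + 2) := hgood i hocc
      have hgnn : 0 ≤ PySem.Chars.find (rest.drop (i + 2)) ['}','}'] :=
        (PySem.Chars.find_nonneg_iff _ _).mpr hgc
      set g := (PySem.Chars.find (rest.drop (i + 2)) ['}','}']).toNat with hgdef
      have hgg : PySem.Chars.find (rest.drop (i + 2)) ['}','}'] = (g : Int) := by omega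
      have hclose : ['}','}'] <+: rest.drop (i + 2 + g) := by
        have h := (PySem.Chars.find_spec hgnn).1
        rw [List.drop_drop] at h
        rw [show i + 2 + g = i + 2 + (PySem.Chars.find (rest.drop (i+2)) ['}','}']).toNat from by omega]
        exact h
      have hcl2 : i + 2 + g + 2 ≤ rest.length := by
        have h := (pv_prefix2_iff '}' '}' rest (i + 2 + g)).mp hclose
        have := List.getElem?_eq_some_iff.mp h.2 |>.1; omega
      have hSA : PySem.Chars.find (out ++ rest) ['{','{'] = ((out.length + i : Nat) : Int) := by
        rw [pv_find_append out rest hBB hL, if_neg hF, hfi]; push_cast; ring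
      have hdropA : ∀ k : Nat, (out ++ rest).drop (out.length + k) = rest.drop k := by
        intro k
        rw [List.drop_append, List.drop_eq_nil_of_le (by omega),
          show out.length + k - out.length = k by omega]
        simp
      have hffA : PySem.Chars.findFrom (out ++ rest) ['}','}'] (((out.length + i : Nat) : Int) + 2) none
          = ((out.length + i + 2 + g : Nat) : Int) := by
        rw [show (((out.length + i : Nat) : Int) + 2) = ((out.length + (i + 2) : Nat) : Int) by push_cast; ring]
        rw [PySem.Chars.findFrom_natCast _ _ (out.length + (i + 2)) (by simp; omega)]
        rw [hdropA (i + 2), hgg, if_neg (by omega)]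
        push_cast; ring
      have hffB : PySem.Chars.findFrom rest ['}','}'] ((i : Int) + 2) none = ((i + 2 + g : Nat) : Int) := by
        rw [show ((i : Int) + 2) = ((i + 2 : Nat) : Int) by push_cast; ring]
        rw [PySem.Chars.findFrom_natCast _ _ (i + 2) hi2, hgg, if_neg (by omega)]
        push_cast; ring
      have hc1 : ¬((out.length + i : Nat) : Int) = -1 := by omega
      have hc2 : ¬((i : Nat) : Int) = -1 := by omega
      have hc3 : ¬((i + 2 + g : Nat) : Int) = -1 := by omega
      have hsl1 : PySem.Chars.slice (out ++ rest) none (some ((out.length + i : Nat) : Int)) = out ++ rest.take i := by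
        rw [PySem.Chars.slice_eq_listSlice, PySem.List.slice_to_natCast, List.take_append,
          List.take_of_length_le (by omega), show out.length + i - out.length = i by omega]
      have hsl2 : PySem.Chars.slice (out ++ rest) (some (((out.length + i : Nat) : Int) + 2)) (some ((out.length + i + 2 + g : Nat) : Int)) = (rest.drop (i + 2)).take g := by
        rw [show (((out.length + i : Nat) : Int) + 2) = ((out.length + (i + 2) : Nat) : Int) by push_cast; ring,
          show ((out.length + i + 2 + g : Nat) : Int) = ((out.length + (i + 2) + g : Nat) : Int) by push_cast; ring,
          PySem.Chars.slice_eq_listSlice, PySem.List.slice_natCast, hdropA (i + 2),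
          show out.length + (i + 2) + g - (out.length + (i + 2)) = g by omega]
      have hsl2B : PySem.Chars.slice rest (some (((i : Nat) : Int) + 2)) (some ((i + 2 + g : Nat) : Int)) = (rest.drop (i + 2)).take g := by
        rw [show (((i : Nat) : Int) + 2) = ((i + 2 : Nat) : Int) by push_cast; ring,
          PySem.Chars.slice_eq_listSlice, PySem.List.slice_natCast,
          show i + 2 + g - (i + 2) = g by omega]
      have hsl3B : PySem.Chars.slice rest (some (((i + 2 + g : Nat) : Int) + 2)) none = rest.drop (i + 2 + g + 2) := by
        rw [show (((i + 2 + g : Nat) : Int) + 2) = ((i + 2 + g + 2 : Nat) : Int) by push_cast; ring,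
          PySem.Chars.slice_eq_listSlice, PySem.List.slice_from_natCast]
      have hsl1B : PySem.Chars.slice rest none (some ((i : Nat) : Int)) = rest.take i := by
        rw [PySem.Chars.slice_eq_listSlice, PySem.List.slice_to_natCast]
      have htail : (if PySem.Chars.len (out ++ rest) > ((out.length + i + 2 + g : Nat) : Int) + 2 then
            PySem.Chars.slice (out ++ rest) (some (((out.length + i + 2 + g : Nat) : Int) + 2)) none
          else []) = rest.drop (i + 2 + g + 2) := by
        have hslt : PySem.Chars.slice (out ++ rest) (some (((out.length + i + 2 + g : Nat) : Int) + 2)) none = rest.drop (i + 2 + g + 2) := by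
          rw [show (((out.length + i + 2 + g : Nat) : Int) + 2) = ((out.length + (i + 2 + g + 2) : Nat) : Int) by push_cast; ring,
            PySem.Chars.slice_eq_listSlice, PySem.List.slice_from_natCast, hdropA]
        by_cases ht : i + 2 + g + 2 < rest.length
        · rw [if_pos (by rw [PySem.Chars.len_eq, List.length_append]; push_cast; omega), hslt]
        · rw [if_neg (by rw [PySem.Chars.len_eq, List.length_append]; push_cast; omega),
            List.drop_eq_nil_of_le (by omega)]
      have hvfree : '{' ∉ (PySem.Dict.getD (PySem.Dict.mk subs) (String.ofList ((rest.drop (i + 2)).take g)) "").toList := by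
        rcases pv_getD_cases subs (String.ofList ((rest.drop (i + 2)).take g)) with h | ⟨p, hp, he⟩
        · rw [h]; simp
        · rw [he]; exact hv p hp
      simp only [processRegexLoop, processRegexAltLoop, hSA, hfi, hffA, hffB, ne_eq, hc1, hc2, hc3,
        not_false_eq_true, if_true, if_false]
      rw [hsl1, hsl2, htail, hsl1B, hsl2B, hsl3B]
      set v := (PySem.Dict.getD (PySem.Dict.mk subs) (String.ofList ((rest.drop (i + 2)).take g)) "").toList with hvdef
      set u := rest.drop (i + 2 + g + 2) with hudef
      rw [show out ++ rest.take i ++ v ++ u = (out ++ rest.take i) ++ (v ++ u) by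
        simp [List.append_assoc]]
      apply ih (out ++ rest.take i) (v ++ u)
      · exact pv_good_rest' rest v _ hgood hvfree
      · exact pv_noBB_out' out rest i hBB hL hmin
      · exact pv_last_out' out rest i hL hocc hmin
      · rw [pvCnt_prepend_free _ _ hvfree]
        have e1 : u = (rest.drop (i + 1)).drop (g + 3) := by
          rw [hudef, List.drop_drop]; congr 1; omega
        have h4 := pvCnt_drop_le (rest.drop (i + 1)) (g + 3)
        have h5 := pvCnt_drop_occ rest i hocc
        have h6 := pvCnt_drop_le rest i
        rw [e1]; omega

-- ===== VERDICT (by name: the statement is the Claim_ definition above) =====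
theorem processRegex_spec : Claim_equal_processRegex := by
  intro r subs _ hpre
  have hpre' : (¬ ['{','{'] <:+: r.toList) ∨
      ((∀ k < r.toList.length, ['{','{'] <+: r.toList.drop k → ['}','}'] <:+: r.toList.drop (k + 2)) ∧
       (∀ p ∈ subs, '{' ∉ p.2.toList)) := hpre
  unfold Spec_processRegex processRegex processRegex_alt
  rcases hpre' with hno | ⟨hr, hsubs⟩
  · have hfind : PySem.Chars.find r.toList ['{','{'] = -1 :=
      (PySem.Chars.find_eq_neg_one_iff _ _).mpr hno
    simp only [processRegexLoop, processRegexAltLoop, hfind, ne_eq, not_true_eq_false,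
      if_false, if_true, List.nil_append]
  · have hgood : pvGood r.toList := by
      intro m hm
      have hlt : m < r.toList.length := (List.getElem?_eq_some_iff.mp hm.1).1
      exact hr m hlt ((pv_prefix2_iff '{' '{' r.toList m).mpr hm)
    have h := pv_loop_eq subs hsubs (r.toList.length + 1) [] r.toList hgood
      (fun m hm => by rcases hm with ⟨h1, _⟩; simp at h1) (by simp)
      (by have := pvCnt_le_length r.toList; omega)
    simp only [List.nil_append] at h
    show String.ofList _ = String.ofList _
    exact congrArg String.ofList h
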